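-- pv_equiv track=rewrite | github.com/kennonlee/adventofcode2022 | 8a.py | tree_diff
-- ===== SOURCE A (Python) =====
-- def tree_diff_lr(row):
--     ret = []
--     max_height = 0
--     for t in row:
--         cur = t - max_height
--         ret.append(t - max_height)
--         if max_height < t:
--             max_height = t
--     return ret
--
-- def tree_diff(rows):
--     diffs = []
--     for row in rows:
--         left = tree_diff_lr(row)
--         row.reverse()
--         right = tree_diff_lr(row)
--         row.reverse()
--         right.reverse()
--         combined = [max(a, b) for a, b in zip(left, right)]
--         diffs.append(combined)
--     return diffs
-- ===== SOURCE B (Python) =====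
-- def _solve(seg, left_bound, right_bound):
--     # answers for seg, given max height to its left (left_bound) and right (right_bound),
--     # both seeded with the 0 baseline at the top call
--     n = len(seg)
--     if n == 0:
--         return []
--     if n == 1:
--         return [seg[0] - min(left_bound, right_bound)]
--     mid = n // 2
--     a = seg[:mid]
--     b = seg[mid:]
--     return (_solve(a, left_bound, max(right_bound, max(b)))
--             + _solve(b, max(left_bound, max(a)), right_bound))
--
-- def tree_diff(rows):
--     diffs = []
--     for row in rows:
--         diffs.append(_solve(row, 0, 0))
--     return diffs
-- ===== Notes on version B (the rewrite author's own statement) =====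
-- stated objective: alternative
-- what changed: B replaces A's two linear left-scans over the row and its in-place-reversed copy by a divide-and-conquer recursion: split the row in half, pass max(outside bound, max of the other half) down to each half, and at a singleton return t - min(left_bound, right_bound); no reversal, no mutation, no running-max scan.
import Mathlib
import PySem

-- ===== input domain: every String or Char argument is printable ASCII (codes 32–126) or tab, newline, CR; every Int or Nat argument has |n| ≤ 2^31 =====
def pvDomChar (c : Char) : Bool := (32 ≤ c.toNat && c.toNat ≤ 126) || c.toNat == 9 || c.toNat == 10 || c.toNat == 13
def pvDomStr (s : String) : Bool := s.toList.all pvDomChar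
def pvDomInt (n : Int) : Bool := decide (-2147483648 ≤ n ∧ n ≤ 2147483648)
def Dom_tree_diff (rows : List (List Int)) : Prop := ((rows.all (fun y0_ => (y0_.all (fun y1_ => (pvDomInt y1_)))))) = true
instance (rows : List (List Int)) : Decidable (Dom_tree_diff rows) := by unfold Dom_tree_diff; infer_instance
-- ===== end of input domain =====

-- B replaces A's two running-max scans (with in-place reversal) by a divide-and-conquer
-- recursion carrying outside-maximum bounds; alternative decomposition, same return value.
-- (A reverses each row in place and back, so rows are net-unchanged; equivalence is on the return value.)

-- ===== PORT A =====
def tree_diff_lr (row : List Int) : List Int :=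
  (row.foldl (fun (st : List Int × Int) t =>
      (st.1 ++ [t - st.2], if st.2 < t then t else st.2)) ([], 0)).1

def tree_diff (rows : List (List Int)) : List (List Int) :=
  rows.foldl (fun diffs row =>
      let left := tree_diff_lr row
      let right := (tree_diff_lr row.reverse).reverse
      let combined := (left.zip right).map (fun ab => max ab.1 ab.2)
      diffs ++ [combined]) []

-- ===== PORT B =====
-- Python's max(xs); exact for nonempty xs (its only call sites here pass nonempty slices).
def pymax (xs : List Int) : Int :=
  match xs with
  | [] => 0
  | h :: t => t.foldl max h

-- seg[:mid] / seg[mid:] with 0 ≤ mid ≤ len(seg) are exactly take/drop; seg[0] on a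
-- nonempty seg is exactly headI.
def solveB (seg : List Int) (left_bound right_bound : Int) : List Int :=
  if seg.length = 0 then []
  else if seg.length = 1 then [seg.headI - min left_bound right_bound]
  else
    let mid := seg.length / 2
    let a := seg.take mid
    let b := seg.drop mid
    solveB a left_bound (max right_bound (pymax b)) ++
      solveB b (max left_bound (pymax a)) right_bound
termination_by seg.length
decreasing_by
  all_goals simp only [List.length_take, List.length_drop]
  · omega
  · omega

def tree_diff_alt (rows : List (List Int)) : List (List Int) :=
  rows.foldl (fun diffs row => diffs ++ [solveB row 0 0]) []

-- ===== PRECONDITION & SPEC =====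
def Spec_tree_diff (rows : List (List Int)) (out : List (List Int)) : Prop := out = tree_diff_alt rows
instance (rows : List (List Int)) (out : List (List Int)) : Decidable (Spec_tree_diff rows out) := by unfold Spec_tree_diff; infer_instance

-- ===== CLAIM (what is proved, stated in full; the proofs are below) =====
def Claim_equal_tree_diff : Prop := ∀ (rows : List (List Int)), Dom_tree_diff rows → Spec_tree_diff rows (tree_diff rows)

-- ===== LEMMAS AND PROOFS =====

/-- max of a list with 0 baseline, from the right. -/
def rmax : List Int → Int
  | [] => 0
  | t :: r => max t (rmax r)

/-- Common clean form of a row's answer: `left_bound` is the running prefix max,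
`R` the fixed outside-right bound. -/
def spec (L R : Int) : List Int → List Int
  | [] => []
  | t :: r => (t - min L (max R (rmax r))) :: spec (max L t) R r

/-- Clean recursion for A's left scan: running max `m`, emit `t - m`. -/
def mgo (m : Int) : List Int → List Int
  | [] => []
  | t :: r => (t - m) :: mgo (max m t) r

/-- Clean recursion for A's right scan (reverse ∘ left-scan ∘ reverse). -/
def rgo : List Int → List Int
  | [] => []
  | t :: r => (t - rmax r) :: rgo r

lemma rmax_nonneg (xs : List Int) : 0 ≤ rmax xs := by
  induction xs with
  | nil => simp [rmax]
  | cons t r ih => simp [rmax]; omega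

lemma rmax_append (xs ys : List Int) : rmax (xs ++ ys) = max (rmax xs) (rmax ys) := by
  induction xs with
  | nil =>
      have := rmax_nonneg ys
      simp [rmax]; omega
  | cons t r ih => simp [rmax, ih, max_assoc]

lemma foldlA_eq (row : List Int) : ∀ (acc : List Int) (m : Int),
    (row.foldl (fun (st : List Int × Int) t =>
      (st.1 ++ [t - st.2], if st.2 < t then t else st.2)) (acc, m)).1 = acc ++ mgo m row := by
  induction row with
  | nil => intro acc m; simp [mgo]
  | cons t r ih =>
      intro acc m
      have hmax : (if m < t then t else m) = max m t := by split <;> omega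
      simp [List.foldl_cons, hmax, ih, mgo]

lemma tree_diff_lr_eq (row : List Int) : tree_diff_lr row = mgo 0 row := by
  simpa using foldlA_eq row [] 0

lemma mgo_append (xs ys : List Int) : ∀ m,
    mgo m (xs ++ ys) = mgo m xs ++ mgo (xs.foldl max m) ys := by
  induction xs with
  | nil => intro m; simp [mgo]
  | cons x r ih => intro m; simp [mgo, ih]

lemma foldr_flip_max (r : List Int) : r.foldr (fun x y => max y x) 0 = rmax r := by
  induction r with
  | nil => rfl
  | cons x r ih =>
      simp only [List.foldr_cons]
      rw [ih]
      exact max_comm _ _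

lemma right_scan_eq (row : List Int) : (mgo 0 row.reverse).reverse = rgo row := by
  induction row with
  | nil => rfl
  | cons t r ih =>
      rw [List.reverse_cons, mgo_append, List.foldl_reverse, foldr_flip_max]
      simp [mgo, rgo, ih]

/-- A's per-row combined value in the clean `spec` form. -/
lemma combined_spec (xs : List Int) : ∀ m,
    ((mgo m xs).zip (rgo xs)).map (fun ab => max ab.1 ab.2) = spec m 0 xs := by
  induction xs with
  | nil => intro m; rfl
  | cons t r ih =>
      intro m
      have h0 := rmax_nonneg r
      have hhd : max (t - m) (t - rmax r) = t - min m (max 0 (rmax r)) := by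
        rcases le_total m (rmax r) with h | h <;> simp [max_def, min_def] <;> omega
      simp [mgo, rgo, spec, List.zip_cons_cons, hhd, ih]

lemma max_foldl (t : List Int) : ∀ m h : Int, max m (t.foldl max h) = t.foldl max (max m h) := by
  induction t with
  | nil => intro m h; rfl
  | cons x r ih =>
      intro m h
      simp only [List.foldl_cons]
      rw [ih, max_assoc]

lemma fold_rmax (xs : List Int) : ∀ m : Int, 0 ≤ m → xs.foldl max m = max m (rmax xs) := by
  induction xs with
  | nil => intro m _; simp [rmax]; omega
  | cons x r ih =>
      intro m hm
      simp only [List.foldl_cons]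
      rw [ih (max m x) (by omega)]
      simp [rmax, max_assoc]

lemma max_pymax (h : Int) (t : List Int) (R : Int) :
    max R (pymax (h :: t)) = (h :: t).foldl max R := by
  simp only [pymax, List.foldl_cons]
  rw [max_foldl]

lemma spec_append (a b : List Int) : ∀ L R : Int,
    spec L R (a ++ b) = spec L (max R (rmax b)) a ++ spec (a.foldl max L) R b := by
  induction a with
  | nil => intro L R; simp [spec]
  | cons t r ih =>
      intro L R
      simp only [List.cons_append, spec, List.foldl_cons]
      rw [ih, rmax_append]
      have : max R (max (rmax r) (rmax b)) = max (max R (rmax b)) (rmax r) := by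
        rcases le_total (rmax r) (rmax b) with h | h <;> omega
      rw [this]

lemma solveB_eq : ∀ (n : Nat) (seg : List Int), seg.length ≤ n → ∀ L R : Int, 0 ≤ R →
    solveB seg L R = spec L R seg := by
  intro n
  induction n with
  | zero =>
      intro seg hlen L R _
      have : seg = [] := by cases seg <;> simp_all
      subst this; simp [solveB, spec]
  | succ n ih =>
      intro seg hlen L R hR
      rw [solveB]
      by_cases h0 : seg.length = 0
      · have : seg = [] := by cases seg <;> simp_all
        subst this; simp [spec]
      · by_cases h1 : seg.length = 1
        · match seg, h1 with
          | [t], _ =>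
              have : max R (0:Int) = R := by omega
              simp [spec, rmax, this]
        · simp only [h0, h1, if_false]
          have hn : 2 ≤ seg.length := by omega
          set mid := seg.length / 2 with hmid
          have hmid1 : 1 ≤ mid := by omega
          have hmidlt : mid < seg.length := by omega
          have hta : (seg.take mid).length = mid := by
            simp [List.length_take]; omega
          have htb : (seg.drop mid).length = seg.length - mid := by simp
          -- nonemptiness of the two halves
          obtain ⟨ah, at', ha⟩ : ∃ h t, seg.take mid = h :: t := by
            cases hx : seg.take mid with
            | nil => simp [hx] at hta; omega
            | cons h t => exact ⟨h, t, rfl⟩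
          obtain ⟨bh, bt', hb⟩ : ∃ h t, seg.drop mid = h :: t := by
            cases hx : seg.drop mid with
            | nil => simp [hx] at htb; omega
            | cons h t => exact ⟨h, t, rfl⟩
          have hR1 : (0:Int) ≤ max R (pymax (seg.drop mid)) := le_trans hR (le_max_left _ _)
          have e1 := ih (seg.take mid) (by omega) L _ hR1
          have e2 := ih (seg.drop mid) (by omega) (max L (pymax (seg.take mid))) R hR
          rw [e1, e2]
          have hsplit : seg = seg.take mid ++ seg.drop mid := (List.take_append_drop _ _).symm
          conv_rhs => rw [hsplit]
          rw [spec_append]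
          congr 1
          · -- right bounds agree
            rw [hb, max_pymax, fold_rmax _ R hR]
          · -- left seeds agree
            rw [ha, max_pymax]

lemma per_row (row : List Int) :
    ((tree_diff_lr row).zip ((tree_diff_lr row.reverse).reverse)).map (fun ab => max ab.1 ab.2)
      = solveB row 0 0 := by
  rw [tree_diff_lr_eq, tree_diff_lr_eq, right_scan_eq, combined_spec,
    solveB_eq row.length row le_rfl 0 0 le_rfl]

lemma outer_eq (rows : List (List Int)) : ∀ acc : List (List Int),
    rows.foldl (fun diffs row =>
      let left := tree_diff_lr row
      let right := (tree_diff_lr row.reverse).reverse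
      let combined := (left.zip right).map (fun ab => max ab.1 ab.2)
      diffs ++ [combined]) acc
    = rows.foldl (fun diffs row => diffs ++ [solveB row 0 0]) acc := by
  induction rows with
  | nil => intro acc; rfl
  | cons row rows ih =>
      intro acc
      simp only [List.foldl_cons]
      rw [per_row row]
      exact ih _

-- ===== VERDICT (by name: the statement is the Claim_ definition above) =====
theorem tree_diff_spec : Claim_equal_tree_diff := by
  intro rows _
  unfold Spec_tree_diff tree_diff tree_diff_alt
  exact outer_eq rows []
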